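-- pv_equiv track=rewrite | github.com/anbclausen/quills | src/simulator.py | process_counts
-- ===== SOURCE A (Python) =====
-- def process_counts(
--     control_counts,
--     noise_counts,
-- ) -> tuple[int, int]:
--     correct = 0
--     wrong = 0
--     for measurement, count in noise_counts.items():
--         if measurement in control_counts.keys():
--             correct += count
--         else:
--             wrong += count
--
--     return correct, wrong
-- ===== SOURCE B (Python) =====
-- def process_counts(
--     control_counts,
--     noise_counts,
-- ) -> tuple[int, int]:
--     total = sum(noise_counts.values())
--     correct = sum(noise_counts.get(k, 0) for k in control_counts)
--     return correct, total - correct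
-- ===== Notes on version B (the rewrite author's own statement) =====
-- stated objective: alternative
-- what changed: Inverts the traversal: instead of scanning every noise entry and testing membership in the control keys, B iterates over the CONTROL keys and looks each one up in the noise dict (get with default 0), summing the hits; wrong is derived as total - correct, with no membership test and no dual accumulator. Pre_ only excludes association lists with duplicate keys, which cannot arise from the Python dict arguments.
import Mathlib
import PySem

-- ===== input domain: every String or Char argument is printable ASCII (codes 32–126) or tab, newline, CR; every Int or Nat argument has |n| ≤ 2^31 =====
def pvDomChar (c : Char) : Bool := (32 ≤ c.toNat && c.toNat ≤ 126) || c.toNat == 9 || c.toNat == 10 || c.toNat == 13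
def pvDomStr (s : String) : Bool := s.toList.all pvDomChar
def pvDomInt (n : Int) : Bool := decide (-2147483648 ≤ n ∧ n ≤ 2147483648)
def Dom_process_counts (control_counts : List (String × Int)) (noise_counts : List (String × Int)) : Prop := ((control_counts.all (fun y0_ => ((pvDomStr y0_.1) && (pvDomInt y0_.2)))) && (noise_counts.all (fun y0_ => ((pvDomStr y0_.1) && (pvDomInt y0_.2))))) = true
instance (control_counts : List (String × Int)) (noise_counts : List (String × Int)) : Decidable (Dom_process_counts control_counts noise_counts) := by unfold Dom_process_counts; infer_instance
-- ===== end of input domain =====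

-- B inverts the traversal (iterate control keys, dict.get into noise, wrong = total - correct); return-value equivalence proved on duplicate-free association lists (the dict representation).

-- ===== PORT A =====
-- Port of A: fold over noise items with (correct, wrong) accumulators, if/else on control-key membership.
def process_counts (control_counts : List (String × Int)) (noise_counts : List (String × Int)) : Int × Int :=
  noise_counts.foldl
    (fun (acc : Int × Int) mc =>
      if control_counts.any (fun kv => kv.1 == mc.1) then (acc.1 + mc.2, acc.2)
      else (acc.1, acc.2 + mc.2))
    (0, 0)

-- ===== PORT B =====
-- noise_counts.get(k, 0): first-match association-list lookup with default 0
def pcGetD (noise_counts : List (String × Int)) (k : String) : Int :=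
  match noise_counts.find? (fun nv => nv.1 == k) with
  | some nv => nv.2
  | none => 0

-- Port of B: total of all noise counts; correct = sum over CONTROL keys of noise.get(k, 0); wrong derived by subtraction.
def process_counts_alt (control_counts : List (String × Int)) (noise_counts : List (String × Int)) : Int × Int :=
  let total := (noise_counts.map Prod.snd).sum
  let correct := (control_counts.map (fun kv => pcGetD noise_counts kv.1)).sum
  (correct, total - correct)

-- ===== PRECONDITION & SPEC =====
-- Pre_ excludes association lists with duplicate keys: the Python arguments are dicts, whose
-- association-list representation always has pairwise-distinct keys, so no Python input is excluded.
def Pre_process_counts (control_counts : List (String × Int)) (noise_counts : List (String × Int)) : Prop :=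
  (control_counts.map Prod.fst).Nodup ∧ (noise_counts.map Prod.fst).Nodup
instance (control_counts : List (String × Int)) (noise_counts : List (String × Int)) : Decidable (Pre_process_counts control_counts noise_counts) := by unfold Pre_process_counts; infer_instance

def pvWitness_process_counts : (List (String × Int)) × (List (String × Int)) :=
  ([("00", 3), ("11", 1)], [("00", 5), ("01", 2)])

def Spec_process_counts (control_counts : List (String × Int)) (noise_counts : List (String × Int)) (out : Int × Int) : Prop := out = process_counts_alt control_counts noise_counts
instance (control_counts : List (String × Int)) (noise_counts : List (String × Int)) (out : Int × Int) : Decidable (Spec_process_counts control_counts noise_counts out) := by unfold Spec_process_counts; infer_instance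

-- ===== CLAIM =====
def Claim_equal_process_counts : Prop := ∀ (control_counts : List (String × Int)) (noise_counts : List (String × Int)), Dom_process_counts control_counts noise_counts → Pre_process_counts control_counts noise_counts → Spec_process_counts control_counts noise_counts (process_counts control_counts noise_counts)

-- ===== LEMMAS AND PROOFS =====

-- A's loop in closed form: correct = sum of matched noise counts, wrong = total - correct.
theorem pc_loop (control_counts noise_counts : List (String × Int)) (c w : Int) :
    noise_counts.foldl
      (fun (acc : Int × Int) mc =>
        if control_counts.any (fun kv => kv.1 == mc.1) then (acc.1 + mc.2, acc.2)
        else (acc.1, acc.2 + mc.2))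
      (c, w)
    = (c + ((noise_counts.filter (fun mc => control_counts.any (fun kv => kv.1 == mc.1))).map Prod.snd).sum,
       w + ((noise_counts.map Prod.snd).sum
            - ((noise_counts.filter (fun mc => control_counts.any (fun kv => kv.1 == mc.1))).map Prod.snd).sum)) := by
  induction noise_counts generalizing c w with
  | nil => simp
  | cons hd tl ih =>
    simp only [List.foldl_cons, List.filter_cons, List.map_cons, List.sum_cons]
    by_cases h : control_counts.any (fun kv => kv.1 == hd.1)
    · simp [h, ih]; ring_nf
    · simp [h, ih]; ring

-- If m is not a key of ctrl, the if-then-else under the sum over ctrl never fires.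
theorem pc_sum_no_hit (ctrl : List (String × Int)) (m : String) (c : Int) (g : String → Int)
    (hm : m ∉ ctrl.map Prod.fst) :
    (ctrl.map (fun kv => if m == kv.1 then c else g kv.1)).sum = (ctrl.map (fun kv => g kv.1)).sum := by
  induction ctrl with
  | nil => simp
  | cons kv tl ih =>
    simp only [List.map_cons, List.mem_cons, not_or] at hm
    have ih' := ih hm.2
    simp only [beq_iff_eq] at ih'
    simp only [List.map_cons, List.sum_cons, beq_iff_eq, hm.1, if_false, ih']

-- Splitting one key m out of the sum over a duplicate-free ctrl.
theorem pc_sum_split (ctrl : List (String × Int)) (m : String) (c : Int) (g : String → Int)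
    (hnd : (ctrl.map Prod.fst).Nodup) (hg : g m = 0) :
    (ctrl.map (fun kv => if m == kv.1 then c else g kv.1)).sum
      = (if ctrl.any (fun kv => kv.1 == m) then c else 0) + (ctrl.map (fun kv => g kv.1)).sum := by
  induction ctrl with
  | nil => simp
  | cons kv tl ih =>
    simp only [List.map_cons, List.nodup_cons] at hnd
    by_cases h : (m == kv.1) = true
    · have hm : m = kv.1 := by simpa [beq_iff_eq] using h
      have hnot : m ∉ tl.map Prod.fst := hm ▸ hnd.1
      have hno := pc_sum_no_hit tl m c g hnot
      have hkv : (kv.1 == m) = true := by simp [hm.symm]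
      simp only [List.map_cons, List.sum_cons, List.any_cons, if_pos h, hkv,
        Bool.true_or, if_true, hno]
      rw [← hm, hg]
      ring
    · have h' : ¬ (kv.1 == m) = true := by
        simp only [beq_iff_eq] at h ⊢; exact fun e => h e.symm
      simp only [List.map_cons, List.sum_cons, List.any_cons, if_neg h, h',
        Bool.false_or, ih hnd.2]
      ring

-- Main lemma: B's control-side sum equals A's matched-noise sum on duplicate-free keys.
theorem pc_swap (ctrl noise : List (String × Int))
    (hc : (ctrl.map Prod.fst).Nodup) (hn : (noise.map Prod.fst).Nodup) :
    (ctrl.map (fun kv => pcGetD noise kv.1)).sum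
      = ((noise.filter (fun mc => ctrl.any (fun kv => kv.1 == mc.1))).map Prod.snd).sum := by
  induction noise with
  | nil => simp [pcGetD]
  | cons hd tl ih =>
    simp only [List.map_cons, List.nodup_cons] at hn
    have hget : ∀ k : String, pcGetD (hd :: tl) k = if hd.1 == k then hd.2 else pcGetD tl k := by
      intro k
      simp only [pcGetD, List.find?_cons]
      by_cases h : (hd.1 == k) = true <;> simp [h]
    have htl0 : pcGetD tl hd.1 = 0 := by
      simp only [pcGetD]
      have : tl.find? (fun nv => nv.1 == hd.1) = none := by
        rw [List.find?_eq_none]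
        intro nv hmem
        simp only [beq_iff_eq]
        exact fun e => hn.1 (e ▸ List.mem_map_of_mem hmem)
      simp [this]
    calc (ctrl.map (fun kv => pcGetD (hd :: tl) kv.1)).sum
        = (ctrl.map (fun kv => if hd.1 == kv.1 then hd.2 else pcGetD tl kv.1)).sum := by
          simp only [hget]
      _ = (if ctrl.any (fun kv => kv.1 == hd.1) then hd.2 else 0) + (ctrl.map (fun kv => pcGetD tl kv.1)).sum := by
          exact pc_sum_split ctrl hd.1 hd.2 (pcGetD tl) hc htl0
      _ = ((List.filter (fun mc => ctrl.any (fun kv => kv.1 == mc.1)) (hd :: tl)).map Prod.snd).sum := by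
          rw [ih hn.2]
          simp only [List.filter_cons]
          by_cases h : ctrl.any (fun kv => kv.1 == hd.1) <;> simp [h]

-- ===== VERDICT =====
theorem process_counts_spec : Claim_equal_process_counts := by
  intro control_counts noise_counts _ hpre
  unfold Spec_process_counts process_counts process_counts_alt
  rw [pc_loop, pc_swap control_counts noise_counts hpre.1 hpre.2]
  simp
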